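-- pv_equiv track=rewrite | github.com/Edison199902222/Leetcode_notes | leetcode/Array/2 or 3 -  pointer/LT 382. Triangle Count.py | triangleCount
-- ===== SOURCE A (Python) =====
-- def triangleCount(S):
--     # write your code here
--     result = 0
--     S.sort()
--     for i in range(2, len(S)):
--         left = 0
--         right = i - 1
--         while left < right:
--             sums = S[left] + S[right]
--             if sums > S[i]:
--                 result += right - left
--                 right -= 1
--             else:
--                 left += 1
--     return result
-- ===== SOURCE B (Python) =====
-- def triangleCount(S):
--     S.sort()
--     n = len(S)
--     return sum(1
--                for i in range(n)
--                for j in range(i + 1, n)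
--                for k in range(j + 1, n)
--                if S[i] + S[j] > S[k])
-- ===== Notes on version B (the rewrite author's own statement) =====
-- stated objective: simpler
-- what changed: Replaces the shrinking two-pointer window per largest side with a direct triple comprehension counting all sorted index triples i<j<k with S[i]+S[j]>S[k].
import Mathlib
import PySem

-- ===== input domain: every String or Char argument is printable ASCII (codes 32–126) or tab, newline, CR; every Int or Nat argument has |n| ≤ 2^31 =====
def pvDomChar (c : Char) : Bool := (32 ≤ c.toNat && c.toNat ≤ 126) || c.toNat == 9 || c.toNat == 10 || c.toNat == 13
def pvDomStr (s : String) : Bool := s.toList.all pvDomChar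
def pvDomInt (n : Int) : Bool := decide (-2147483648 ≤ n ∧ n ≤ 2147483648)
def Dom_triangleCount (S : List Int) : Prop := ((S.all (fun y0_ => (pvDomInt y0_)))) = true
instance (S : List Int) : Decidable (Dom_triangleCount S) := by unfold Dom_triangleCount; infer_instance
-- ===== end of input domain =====

-- B replaces A's two-pointer window with a direct triple enumeration (a different algorithm, not faster);
-- both Pythons sort S in place (the same side effect); the equivalence proved is about the return value.

-- ===== PORT A =====
-- the while-loop: while left < right: …  (indices are always in range in A's loop, so pyGetD is exact)
def twoPtrA (T : List Int) (t : Int) (left right acc : Int) : Int :=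
  if left < right then
    let sums := PySem.List.pyGetD T left 0 + PySem.List.pyGetD T right 0
    if sums > t then twoPtrA T t left (right - 1) (acc + (right - left))
    else twoPtrA T t (left + 1) right acc
  else acc
termination_by (right - left).toNat
decreasing_by all_goals omega

def triangleCount (S : List Int) : Int :=
  let T := PySem.List.sorted S (fun x => x) false
  (PySem.List.pyRange 2 (T.length : Int) 1).foldl
    (fun result i => twoPtrA T (PySem.List.pyGetD T i 0) 0 (i - 1) result) 0

-- ===== PORT B =====
def triangleCount_alt (S : List Int) : Int :=
  let T := PySem.List.sorted S (fun x => x) false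
  let n : Int := (T.length : Int)
  (PySem.List.pyRange 0 n 1).foldl (fun s i =>
    s + (PySem.List.pyRange (i + 1) n 1).foldl (fun s j =>
      s + (PySem.List.pyRange (j + 1) n 1).foldl (fun s k =>
        s + (if PySem.List.pyGetD T i 0 + PySem.List.pyGetD T j 0 > PySem.List.pyGetD T k 0
             then 1 else 0)) 0) 0) 0

-- ===== PRECONDITION & SPEC =====
def Spec_triangleCount (S : List Int) (out : Int) : Prop := out = triangleCount_alt S
instance (S : List Int) (out : Int) : Decidable (Spec_triangleCount S out) := by unfold Spec_triangleCount; infer_instance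

-- ===== CLAIM (what is proved, stated in full; the proofs are below) =====
def Claim_equal_triangleCount : Prop := ∀ (S : List Int), Dom_triangleCount S → Spec_triangleCount S (triangleCount S)

-- ===== LEMMAS AND PROOFS =====

-- indicator of a valid triangle triple (on the sorted list, getD view)
def tcInd (T : List Int) (i j k : ℕ) : Int :=
  if T.getD i 0 + T.getD j 0 > T.getD k 0 then 1 else 0

-- number of pairs (i,j), l ≤ i < j ≤ r, with T[i]+T[j] > t
def tcP (T : List Int) (t : Int) (l r : ℕ) : Int :=
  ∑ j ∈ Finset.Ico l (r + 1), ∑ i ∈ Finset.Ico l j,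
    (if T.getD i 0 + T.getD j 0 > t then 1 else 0)

theorem tcP_degenerate (T : List Int) (t : Int) (l r : ℕ) (h : r ≤ l) : tcP T t l r = 0 := by
  unfold tcP
  apply Finset.sum_eq_zero
  intro j hj
  rw [Finset.mem_Ico] at hj
  rw [Finset.Ico_eq_empty (by omega), Finset.sum_empty]

-- the two-pointer loop counts exactly the pairs of tcP, on a list nondecreasing in getD
theorem twoPtrA_eq (T : List Int) (t : Int)
    (hm : ∀ p q : ℕ, p ≤ q → q < T.length → T.getD p 0 ≤ T.getD q 0) :
    ∀ (d l r : ℕ), r - l = d → r < T.length → ∀ acc : Int,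
    twoPtrA T t (l : Int) (r : Int) acc = acc + tcP T t l r := by
  intro d
  induction d with
  | zero =>
    intro l r hd hr acc
    rw [twoPtrA, if_neg (by omega), tcP_degenerate T t l r (by omega), add_zero]
  | succ m ih =>
    intro l r hd hr acc
    have hlr : l < r := by omega
    have hGl : PySem.List.pyGetD T (l : Int) 0 = T.getD l 0 := PySem.List.pyGetD_natCast ..
    have hGr : PySem.List.pyGetD T (r : Int) 0 = T.getD r 0 := PySem.List.pyGetD_natCast ..
    rw [twoPtrA, if_pos (by exact_mod_cast hlr)]
    simp only [hGl, hGr]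
    by_cases hc : T.getD l 0 + T.getD r 0 > t
    · rw [if_pos hc]
      have hr1 : (r : Int) - 1 = ((r - 1 : ℕ) : Int) := by omega
      rw [hr1, ih l (r - 1) (by omega) (by omega)]
      have hsplit : tcP T t l r = tcP T t l (r - 1)
          + ∑ i ∈ Finset.Ico l r, (if T.getD i 0 + T.getD r 0 > t then 1 else 0 : Int) := by
        unfold tcP
        have : r - 1 + 1 = r := by omega
        rw [this, Finset.sum_Ico_succ_top (by omega)]
      have hrow : ∑ i ∈ Finset.Ico l r, (if T.getD i 0 + T.getD r 0 > t then 1 else 0 : Int)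
          = (r : Int) - (l : Int) := by
        have h1 : ∀ i ∈ Finset.Ico l r, (if T.getD i 0 + T.getD r 0 > t then 1 else 0 : Int) = 1 := by
          intro i hi
          rw [Finset.mem_Ico] at hi
          rw [if_pos]
          have := hm l i (by omega) (by omega)
          omega
        rw [Finset.sum_congr rfl h1, Finset.sum_const, Nat.card_Ico]
        simp
        omega
      rw [hsplit, hrow]; ring
    · rw [if_neg hc]
      push Not at hc
      have hl1 : (l : Int) + 1 = ((l + 1 : ℕ) : Int) := by omega
      rw [hl1, ih (l + 1) r (by omega) hr]
      congr 1
      unfold tcP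
      rw [Finset.sum_eq_sum_Ico_succ_bot (by omega : l < r + 1)]
      rw [Finset.Ico_eq_empty (by omega : ¬ l < l), Finset.sum_empty, zero_add]
      apply Finset.sum_congr rfl
      intro j hj
      rw [Finset.mem_Ico] at hj
      rw [Finset.sum_eq_sum_Ico_succ_bot (by omega : l < j)]
      have hz : (if T.getD l 0 + T.getD j 0 > t then 1 else 0 : Int) = 0 := by
        rw [if_neg]
        have := hm j r (by omega) hr
        omega
      rw [hz, zero_add]

-- list-range sum to Finset sum
theorem tc_sum_pyRange (a b : Int) (ha : 0 ≤ a) (g : ℕ → Int) :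
    ((PySem.List.pyRange a b 1).map (fun i => g i.toNat)).sum = ∑ k ∈ Finset.Ico a.toNat b.toNat, g k := by
  rw [PySem.List.pyRange_one, List.map_map]
  have h1 : ((fun i : Int => g i.toNat) ∘ fun k : ℕ => a + k) = fun k : ℕ => g (a.toNat + k) := by
    funext k; simp only [Function.comp]; congr 1; omega
  rw [h1]
  have h2 : ∀ n (f : ℕ → Int), ((List.range n).map f).sum = ∑ k ∈ Finset.range n, f k := by
    intro n f
    induction n with
    | zero => simp
    | succ m ih => rw [List.range_succ, Finset.sum_range_succ, List.map_append, List.sum_append, ih]; simp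
  rw [h2, Finset.sum_Ico_eq_sum_range]
  have : b.toNat - a.toNat = (b - a).toNat := by omega
  rw [this]

-- congruence-friendly form of tc_sum_pyRange
theorem tc_sum_pyRange' (a b : Int) (ha : 0 ≤ a) (f : Int → Int) (g : ℕ → Int)
    (hfg : ∀ x : Int, a ≤ x → x < b → f x = g x.toNat) :
    ((PySem.List.pyRange a b 1).map f).sum = ∑ k ∈ Finset.Ico a.toNat b.toNat, g k := by
  rw [List.map_congr_left (g := fun i : Int => g i.toNat) ?h, tc_sum_pyRange a b ha g]
  case h =>
    intro x hx
    rw [PySem.List.mem_pyRange_one] at hx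
    exact hfg x hx.1 hx.2

theorem tc_filter_lt (N k : ℕ) (hk : k ≤ N) : Finset.range k = (Finset.range N).filter (· < k) := by
  ext x; simp [Finset.mem_filter]; omega

theorem tc_filter_gt (N i : ℕ) : Finset.Ico (i+1) N = (Finset.range N).filter (i < ·) := by
  ext x; simp [Finset.mem_filter, Finset.mem_Ico]; omega

-- Fubini for the triple sum: iterate by largest index (A) or by smallest index (B)
theorem tc_exchange (N : ℕ) (F : ℕ → ℕ → ℕ → Int) :
    ∑ k ∈ Finset.range N, ∑ j ∈ Finset.range k, ∑ i ∈ Finset.range j, F i j k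
  = ∑ i ∈ Finset.range N, ∑ j ∈ Finset.Ico (i+1) N, ∑ k ∈ Finset.Ico (j+1) N, F i j k := by
  have hL : ∑ k ∈ Finset.range N, ∑ j ∈ Finset.range k, ∑ i ∈ Finset.range j, F i j k
      = ∑ k ∈ Finset.range N, ∑ j ∈ Finset.range N, ∑ i ∈ Finset.range N,
          (if i < j ∧ j < k then F i j k else 0) := by
    apply Finset.sum_congr rfl; intro k hk
    rw [Finset.mem_range] at hk
    rw [tc_filter_lt N k (by omega), Finset.sum_filter]
    apply Finset.sum_congr rfl; intro j _
    by_cases hjk : j < k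
    · rw [if_pos hjk, tc_filter_lt N j (by omega), Finset.sum_filter]
      apply Finset.sum_congr rfl; intro i _
      by_cases hij : i < j
      · rw [if_pos hij, if_pos ⟨hij, hjk⟩]
      · rw [if_neg hij, if_neg (by tauto)]
    · rw [if_neg hjk]
      symm; apply Finset.sum_eq_zero; intro i _
      rw [if_neg (by tauto)]
  have hR : ∑ i ∈ Finset.range N, ∑ j ∈ Finset.Ico (i+1) N, ∑ k ∈ Finset.Ico (j+1) N, F i j k
      = ∑ i ∈ Finset.range N, ∑ j ∈ Finset.range N, ∑ k ∈ Finset.range N,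
          (if i < j ∧ j < k then F i j k else 0) := by
    apply Finset.sum_congr rfl; intro i _
    rw [tc_filter_gt N i, Finset.sum_filter]
    apply Finset.sum_congr rfl; intro j _
    by_cases hij : i < j
    · rw [if_pos hij, tc_filter_gt N j, Finset.sum_filter]
      apply Finset.sum_congr rfl; intro k _
      by_cases hjk : j < k
      · rw [if_pos hjk, if_pos ⟨hij, hjk⟩]
      · rw [if_neg hjk, if_neg (by tauto)]
    · rw [if_neg hij]
      symm; apply Finset.sum_eq_zero; intro k _
      rw [if_neg (by tauto)]
  rw [hL, hR, Finset.sum_comm]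
  rw [show (∑ j ∈ Finset.range N, ∑ k ∈ Finset.range N, ∑ i ∈ Finset.range N,
        (if i < j ∧ j < k then F i j k else 0))
      = ∑ j ∈ Finset.range N, ∑ i ∈ Finset.range N, ∑ k ∈ Finset.range N,
        (if i < j ∧ j < k then F i j k else 0)
    from Finset.sum_congr rfl (fun j _ => Finset.sum_comm)]
  rw [Finset.sum_comm]

theorem triangleCount_spec_aux (S : List Int) : triangleCount S = triangleCount_alt S := by
  have hm : ∀ p q : ℕ, p ≤ q → q < (PySem.List.sorted S (fun x => x) false).length →
      (PySem.List.sorted S (fun x => x) false).getD p 0 ≤ (PySem.List.sorted S (fun x => x) false).getD q 0 := by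
    intro p q hpq hq
    rw [List.getD_eq_getElem _ 0 (by omega), List.getD_eq_getElem _ 0 hq]
    exact PySem.List.sorted_id_getElem_mono S hpq hq
  set T := PySem.List.sorted S (fun x => x) false with hT
  set N := T.length with hN
  -- ===== A side: the fold of two-pointer counts is the triple sum iterated by largest index =====
  have hA : triangleCount S
      = ∑ k ∈ Finset.range N, ∑ j ∈ Finset.range k, ∑ i ∈ Finset.range j, tcInd T i j k := by
    show (PySem.List.pyRange 2 (N : Int) 1).foldl
        (fun result i => twoPtrA T (PySem.List.pyGetD T i 0) 0 (i - 1) result) 0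
      = _
    rw [PySem.List.foldl_congr_mem _ _
        (fun result i => result + tcP T (T.getD i.toNat 0) 0 (i.toNat - 1)) 0 ?hstep]
    case hstep =>
      intro res x hx
      rw [PySem.List.mem_pyRange_one] at hx
      have key := twoPtrA_eq T (T.getD x.toNat 0) hm (x.toNat - 1) 0 (x.toNat - 1) rfl (by omega) res
      simp only [Nat.cast_zero] at key
      show twoPtrA T (PySem.List.pyGetD T x 0) 0 (x - 1) res
        = res + tcP T (T.getD x.toNat 0) 0 (x.toNat - 1)
      have hx0 : x = ((x.toNat : ℕ) : Int) := by omega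
      have hg : PySem.List.pyGetD T x 0 = T.getD x.toNat 0 := by
        conv_lhs => rw [hx0]
        rw [PySem.List.pyGetD_natCast]
      have hs : x - 1 = ((x.toNat - 1 : ℕ) : Int) := by omega
      rw [hg, hs]
      exact key
    rw [PySem.List.foldl_add, zero_add,
        tc_sum_pyRange' 2 (N : Int) (by omega) _ (fun k => tcP T (T.getD k 0) 0 (k - 1))
          (fun x _ _ => rfl)]
    rw [show (2 : Int).toNat = 2 from rfl, show ((N : Int)).toNat = N from by omega]
    have hsub : Finset.Ico 2 N ⊆ Finset.range N := by
      intro x hx; rw [Finset.mem_Ico] at hx; rw [Finset.mem_range]; omega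
    rw [Finset.sum_subset hsub (fun x hx hnx => ?_)]
    · apply Finset.sum_congr rfl
      intro k hk
      rw [Finset.mem_range] at hk
      by_cases h2 : 2 ≤ k
      · unfold tcP tcInd
        rw [show k - 1 + 1 = k from by omega, ← Finset.range_eq_Ico]
      · rw [tcP_degenerate T _ 0 (k - 1) (by omega)]
        symm
        interval_cases k
        · simp
        · simp
    · rw [Finset.mem_range] at hx
      rw [Finset.mem_Ico] at hnx
      push Not at hnx
      have hx2 : x < 2 := by omega
      interval_cases x
      · exact tcP_degenerate T _ 0 0 le_rfl
      · exact tcP_degenerate T _ 0 0 le_rfl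
  -- ===== B side: the nested folds are the triple sum iterated by smallest index =====
  have hB : triangleCount_alt S
      = ∑ i ∈ Finset.range N, ∑ j ∈ Finset.Ico (i+1) N, ∑ k ∈ Finset.Ico (j+1) N, tcInd T i j k := by
    show (PySem.List.pyRange 0 (N : Int) 1).foldl (fun s i =>
        s + (PySem.List.pyRange (i + 1) (N : Int) 1).foldl (fun s j =>
          s + (PySem.List.pyRange (j + 1) (N : Int) 1).foldl (fun s k =>
            s + (if PySem.List.pyGetD T i 0 + PySem.List.pyGetD T j 0 > PySem.List.pyGetD T k 0
                 then 1 else 0)) 0) 0) 0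
      = _
    simp only [PySem.List.foldl_add, zero_add]
    rw [tc_sum_pyRange' 0 (N : Int) (by omega) _
        (fun m => ∑ j ∈ Finset.Ico (m+1) N, ∑ k ∈ Finset.Ico (j+1) N, tcInd T m j k) ?houter]
    · rw [show (0 : Int).toNat = 0 from rfl, show ((N : Int)).toNat = N from by omega,
          Finset.range_eq_Ico]
    case houter =>
      intro x hx0 hxN
      rw [tc_sum_pyRange' (x+1) (N : Int) (by omega) _
          (fun m => ∑ k ∈ Finset.Ico (m+1) N, tcInd T x.toNat m k) ?hmid]
      · rw [show (x+1).toNat = x.toNat + 1 from by omega, show ((N : Int)).toNat = N from by omega]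
      case hmid =>
        intro y hy0 hyN
        rw [tc_sum_pyRange' (y+1) (N : Int) (by omega) _
            (fun m => tcInd T x.toNat y.toNat m) ?hinner]
        · rw [show (y+1).toNat = y.toNat + 1 from by omega, show ((N : Int)).toNat = N from by omega]
        case hinner =>
          intro z hz0 hzN
          have hx' : x = ((x.toNat : ℕ) : Int) := by omega
          have hy' : y = ((y.toNat : ℕ) : Int) := by omega
          have hz' : z = ((z.toNat : ℕ) : Int) := by omega
          rw [hx', hy', hz', PySem.List.pyGetD_natCast, PySem.List.pyGetD_natCast,
              PySem.List.pyGetD_natCast]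
          rfl
  rw [hA, hB, tc_exchange]

-- ===== VERDICT (by name: the statement is the Claim_ definition above) =====
theorem triangleCount_spec : Claim_equal_triangleCount := by
  intro S _
  unfold Spec_triangleCount
  exact triangleCount_spec_aux S
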